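-- pv_equiv track=rewrite | github.com/jusopchoi/programmers_practices | Kakao2020/06_wall_inspection.py | search_start
-- ===== SOURCE A (Python) =====
-- def search_start(n, weak):
--     short = weak[-1] - weak[0]
--     new_weak = weak
--     for ith in range(1, len(weak)):
--         temp_short = n - weak[ith] + weak[ith - 1]
--         if temp_short < short:
--             short = temp_short
--             new_weak = weak[ith:] + weak[:ith]
--     weak = []
--     for w in new_weak:
--         if w < new_weak[0]:
--             weak.append(w + n - new_weak[0])
--         else:
--             weak.append(w - new_weak[0])
--     return short, weak
-- ===== SOURCE B (Python) =====
-- def search_start(n, weak):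
--     # Materialize every rotation candidate as a (rest_length, rotation_index) pair:
--     # index 0 is the unrotated candidate, index i cuts the circle just before weak[i].
--     spans = [(weak[-1] - weak[0], 0)] + \
--         [(n - b + a, i) for i, (a, b) in enumerate(zip(weak, weak[1:]), 1)]
--     # Lexicographic sort; its first element is the smallest span, earliest index on ties
--     # (the same winner A's strict-improvement scan keeps).
--     short, idx = sorted(spans)[0]
--     new_weak = weak[idx:] + weak[:idx]
--     base = new_weak[0]
--     return short, [w + n - base if w < base else w - base for w in new_weak]
-- ===== Notes on version B (the rewrite author's own statement) =====
-- stated objective: alternative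
-- what changed: B replaces A's streaming strict-improvement scan (which rebuilds the rotated list on every improvement) by a sort-based selection: it materializes all (span, index) candidate pairs via zip/enumerate, lexicographically sorts them and takes the first, then rotates once and normalizes with a comprehension.
import Mathlib
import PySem

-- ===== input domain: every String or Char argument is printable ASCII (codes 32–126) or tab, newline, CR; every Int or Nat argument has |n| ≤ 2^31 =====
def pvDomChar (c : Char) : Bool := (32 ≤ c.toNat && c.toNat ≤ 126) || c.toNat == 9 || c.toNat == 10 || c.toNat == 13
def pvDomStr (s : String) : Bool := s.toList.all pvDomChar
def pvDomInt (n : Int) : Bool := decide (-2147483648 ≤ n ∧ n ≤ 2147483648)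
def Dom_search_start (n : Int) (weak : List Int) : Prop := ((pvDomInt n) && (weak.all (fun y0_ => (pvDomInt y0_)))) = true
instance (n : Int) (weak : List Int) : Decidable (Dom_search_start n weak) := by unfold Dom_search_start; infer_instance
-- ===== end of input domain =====

-- B selects the best rotation by materializing all (span, index) candidate pairs via
-- zip/enumerate, sorting them lexicographically and taking the first, instead of A's
-- streaming strict-improvement scan that rebuilds the rotated list on every improvement
-- (alternative decomposition; return values proved equal on nonempty weak).

-- ===== PORT A =====
def search_start (n : Int) (weak : List Int) : Int × List Int :=
  let short0 := (PySem.List.pyGet? weak (-1)).getD 0 - (PySem.List.pyGet? weak 0).getD 0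
  let st := (PySem.List.pyRange 1 (weak.length : Int) 1).foldl
    (fun (st : Int × List Int) ith =>
      let temp := n - (PySem.List.pyGet? weak ith).getD 0 + (PySem.List.pyGet? weak (ith - 1)).getD 0
      if temp < st.1 then
        (temp, PySem.List.slice weak (some ith) none ++ PySem.List.slice weak none (some ith))
      else st)
    (short0, weak)
  let base := (PySem.List.pyGet? st.2 0).getD 0
  (st.1, st.2.foldl (fun acc w => acc ++ [if w < base then w + n - base else w - base]) [])

-- ===== PORT B =====
def search_start_alt (n : Int) (weak : List Int) : Int × List Int :=
  let spans : List (Int × Int) :=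
    ((PySem.List.pyGet? weak (-1)).getD 0 - (PySem.List.pyGet? weak 0).getD 0, 0) ::
      (PySem.List.enumerate (weak.zip (PySem.List.slice weak (some 1) none)) 1).map
        (fun p => (n - p.2.2 + p.2.1, p.1))
  let best := (PySem.List.pyGet? (PySem.List.sorted2 spans (fun q => q.1) (fun q => q.2)) 0).getD (0, 0)
  let short := best.1
  let idx := best.2
  let new_weak := PySem.List.slice weak (some idx) none ++ PySem.List.slice weak none (some idx)
  let base := (PySem.List.pyGet? new_weak 0).getD 0
  (short, new_weak.map (fun w => if w < base then w + n - base else w - base))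

-- ===== PRECONDITION & SPEC =====
-- Pre_ excludes exactly the empty list, on which A raises IndexError (weak[-1]); B raises there too.
def Pre_search_start (n : Int) (weak : List Int) : Prop := weak ≠ []
instance (n : Int) (weak : List Int) : Decidable (Pre_search_start n weak) := by
  unfold Pre_search_start; infer_instance
def pvWitness_search_start : Int × List Int := (12, [1, 3, 4, 9, 10])
def Spec_search_start (n : Int) (weak : List Int) (out : Int × List Int) : Prop := out = search_start_alt n weak
instance (n : Int) (weak : List Int) (out : Int × List Int) : Decidable (Spec_search_start n weak out) := by
  unfold Spec_search_start; infer_instance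

-- ===== CLAIM (what is proved, stated in full; the proofs are below) =====
def Claim_equal_search_start : Prop := ∀ (n : Int) (weak : List Int), Dom_search_start n weak → Pre_search_start n weak → Spec_search_start n weak (search_start n weak)

-- ===== LEMMAS AND PROOFS =====

-- The circular gap ending at weak[i] (gapF 0 is the wrap-around gap, so that A's candidate
-- rest-length for rotation index i is n - gapF i, including its initial candidate at i = 0).
def gapF (n : Int) (weak : List Int) : Nat → Int := fun i =>
  if i = 0 then n - (weak.getLast?.getD 0 - weak[0]?.getD 0)
  else weak[i]?.getD 0 - weak[i-1]?.getD 0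

-- First index of the maximum of g over 0..m (strict-improvement scan, as A does it).
def bestIdx (g : Nat → Int) : Nat → Nat
  | 0 => 0
  | m+1 => if g (bestIdx g m) < g (m+1) then m + 1 else bestIdx g m

def bestJ (n : Int) (weak : List Int) : Nat := bestIdx (gapF n weak) (weak.length - 1)

def rotAt (weak : List Int) (j : Nat) : List Int := weak.drop j ++ weak.take j

def normAt (n : Int) (l : List Int) : List Int :=
  l.map (fun w => if w < l[0]?.getD 0 then w + n - l[0]?.getD 0 else w - l[0]?.getD 0)

theorem bestIdx_succ (g : Nat → Int) (m : Nat) :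
    bestIdx g (m+1) = if g (bestIdx g m) < g (m+1) then m + 1 else bestIdx g m := rfl

theorem bestIdx_le (g : Nat → Int) (m : Nat) : bestIdx g m ≤ m := by
  induction m with
  | zero => simp [bestIdx]
  | succ m ih => unfold bestIdx; split <;> omega

theorem bestIdx_max (g : Nat → Int) (m : Nat) : ∀ j ≤ m, g j ≤ g (bestIdx g m) := by
  induction m with
  | zero => intro j hj; interval_cases j; simp [bestIdx]
  | succ m ih =>
    intro j hj
    rw [bestIdx_succ]
    split
    next h =>
      rcases Nat.le_succ_iff.mp hj with h' | h'
      · exact (ih j h').trans (le_of_lt h)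
      · subst h'; exact le_rfl
    next h =>
      rcases Nat.le_succ_iff.mp hj with h' | h'
      · exact ih j h'
      · subst h'; exact not_lt.mp h

theorem bestIdx_strict (g : Nat → Int) (m : Nat) :
    ∀ j < bestIdx g m, g j < g (bestIdx g m) := by
  induction m with
  | zero => intro j hj; simp [bestIdx] at hj
  | succ m ih =>
    intro j hj
    rw [bestIdx_succ] at hj ⊢
    split
    next h =>
      have hjm : j ≤ m := by
        have := bestIdx_le g m; simp only [if_pos h] at hj; omega
      exact lt_of_le_of_lt (bestIdx_max g m j hjm) h
    next h =>
      simp only [if_neg h] at hj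
      exact ih j hj

theorem cast_one_add (k : Nat) : (1 : Int) + (k : Nat) = ((k+1 : Nat) : Int) := by push_cast; ring

-- A's scan over indices 1..m keeps (n - g J, rotation at J) for J the first argmax of g on 0..m.
theorem scanA (n : Int) (weak : List Int) (g : Nat → Int) (m : Nat) :
    (List.range m).foldl
      (fun (st : Int × List Int) k =>
        if n - g (k+1) < st.1 then (n - g (k+1), weak.drop (k+1) ++ weak.take (k+1)) else st)
      (n - g 0, weak)
    = (n - g (bestIdx g m), weak.drop (bestIdx g m) ++ weak.take (bestIdx g m)) := by
  induction m with
  | zero => simp [bestIdx]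
  | succ m ih =>
    rw [List.range_succ, List.foldl_append, ih, List.foldl_cons, List.foldl_nil]
    rw [bestIdx_succ]
    by_cases h : g (bestIdx g m) < g (m+1)
    · rw [if_pos h, if_pos (show n - g (m+1) < n - g (bestIdx g m) by omega)]
    · rw [if_neg h, if_neg (show ¬ (n - g (m+1) < n - g (bestIdx g m)) by omega)]

theorem A_eq (n : Int) (weak : List Int) :
    search_start n weak
      = (n - gapF n weak (bestJ n weak), normAt n (rotAt weak (bestJ n weak))) := by
  have hL : ((weak.length : Int) - 1).toNat = weak.length - 1 := by omega
  unfold search_start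
  dsimp only
  rw [PySem.List.pyRange_one, hL, List.foldl_map]
  have hbody : ∀ (st : Int × List Int) (k : Nat), k ∈ List.range (weak.length - 1) →
      (fun (st : Int × List Int) k =>
        let ith := (1 : Int) + (k : Nat)
        let temp := n - (PySem.List.pyGet? weak ith).getD 0 + (PySem.List.pyGet? weak (ith - 1)).getD 0
        if temp < st.1 then
          (temp, PySem.List.slice weak (some ith) none ++ PySem.List.slice weak none (some ith))
        else st) st k
      = (fun (st : Int × List Int) k =>
          if n - gapF n weak (k+1) < st.1 then
            (n - gapF n weak (k+1), weak.drop (k+1) ++ weak.take (k+1)) else st) st k := by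
    intro st k _
    simp only [cast_one_add k, PySem.List.pyGet?_natCast, PySem.List.slice_from_natCast,
      PySem.List.slice_to_natCast,
      show ((k+1 : Nat) : Int) - 1 = (k : Nat) by push_cast; ring]
    simp [gapF, sub_add]
  rw [PySem.List.foldl_congr_mem _ _ _ _ hbody]
  have hinit : (PySem.List.pyGet? weak (-1)).getD 0 - (PySem.List.pyGet? weak 0).getD 0
      = n - gapF n weak 0 := by
    simp [gapF, PySem.List.pyGet?_neg_one, PySem.List.pyGet?_zero]
  rw [hinit, scanA n weak (gapF n weak) (weak.length - 1)]
  simp only [PySem.List.pyGet?_zero, PySem.List.foldl_append_singleton_eq_map, List.nil_append]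
  rfl

-- B's candidate list is exactly the (n - gap, index) table over all rotation indices.
theorem spans_eq (n : Int) (weak : List Int) (hne : weak ≠ []) :
    (((PySem.List.pyGet? weak (-1)).getD 0 - (PySem.List.pyGet? weak 0).getD 0, (0 : Int)) ::
      (PySem.List.enumerate (weak.zip (PySem.List.slice weak (some 1) none)) 1).map
        (fun p => (n - p.2.2 + p.2.1, p.1)))
    = (List.range weak.length).map (fun i => (n - gapF n weak i, (i : Int))) := by
  have hlen : 0 < weak.length := List.length_pos_of_ne_nil hne
  rw [PySem.List.slice_from_one]
  conv_rhs => rw [show weak.length = (weak.length - 1) + 1 by omega, List.range_succ_eq_map,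
    List.map_cons, List.map_map]
  congr 1
  · simp [gapF, PySem.List.pyGet?_neg_one, PySem.List.pyGet?_zero]
  · apply List.ext_getElem?
    intro i
    by_cases hi : i < weak.length - 1
    · have h1 : i < weak.length := by omega
      have h2 : i + 1 < weak.length := by omega
      simp [hi, h1, h2, Function.comp, gapF]
      rw [PySem.List.getElem_enumerate]
      simp [List.getElem_zip, List.getElem_tail]
      constructor <;> push_cast <;> ring
    · simp [hi]

-- Python's tuple '<' on (span, index) pairs is the lexicographic order on Int × Int.
theorem lex_before (a b : Int × Int) :
    (decide (toLex a < toLex b)) = (decide (a.1 < b.1) || (!decide (b.1 < a.1) && decide (a.2 < b.2))) := by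
  rcases a with ⟨a1, a2⟩; rcases b with ⟨b1, b2⟩
  by_cases h1 : a1 < b1 <;> by_cases h2 : b1 < a1 <;> by_cases h3 : a2 < b2 <;>
    simp [Prod.Lex.lt_iff, h1, h2, h3] <;> omega

theorem sorted2_eq_lex (xs : List (Int × Int)) :
    PySem.List.sorted2 xs (fun q => q.1) (fun q => q.2)
      = PySem.List.sorted xs (fun q => toLex q) false := by
  rw [PySem.List.sorted_eq_foldl_insertBy]
  simp only [PySem.List.sorted2]
  congr 1
  simp only [if_neg (by decide : ¬ (false = true))]
  funext acc x
  congr 1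
  funext a b
  exact (lex_before a b).symm

-- Head of the sorted candidate table = (n - gap at bestJ, bestJ):
-- the lex-least pair is unique because indices are distinct, and its index is A's winner.
theorem sorted_head_eq (n : Int) (weak : List Int) (hne : weak ≠ []) :
    (PySem.List.pyGet? (PySem.List.sorted2
        ((List.range weak.length).map (fun i => (n - gapF n weak i, (i : Int))))
        (fun q => q.1) (fun q => q.2)) 0).getD (0, 0)
    = (n - gapF n weak (bestJ n weak), (bestJ n weak : Int)) := by
  have hlen : 0 < weak.length := List.length_pos_of_ne_nil hne
  have hJlt : bestJ n weak < weak.length := by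
    have := bestIdx_le (gapF n weak) (weak.length - 1); unfold bestJ; omega
  set l := (List.range weak.length).map (fun i => (n - gapF n weak i, (i : Int))) with hl
  have hmem_t : (n - gapF n weak (bestJ n weak), (bestJ n weak : Int)) ∈ l :=
    List.mem_map.mpr ⟨bestJ n weak, List.mem_range.mpr hJlt, rfl⟩
  rw [sorted2_eq_lex]
  have hne' : PySem.List.sorted l (fun q => toLex q) false ≠ [] := by
    intro h
    have hnil := (PySem.List.sorted_eq_nil_iff l (fun q => toLex q) false).mp h
    rw [hl] at hnil
    rw [List.map_eq_nil_iff, List.range_eq_nil] at hnil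
    omega
  obtain ⟨m, t, hmt⟩ := List.exists_cons_of_ne_nil hne'
  rw [hmt, PySem.List.pyGet?_zero_cons, Option.getD_some]
  have hmle := PySem.List.key_head_sorted_le l (fun q => toLex q) hmt
  have hm_mem : m ∈ l := (PySem.List.mem_sorted l (fun q => toLex q) false m).mp (hmt ▸ List.mem_cons_self)
  have htmin : ∀ y ∈ l, (toLex (n - gapF n weak (bestJ n weak), (bestJ n weak : Int)) : Lex (Int × Int)) ≤ toLex y := by
    intro y hy
    obtain ⟨i, hi, rfl⟩ := List.mem_map.mp hy
    have hi' : i < weak.length := List.mem_range.mp hi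
    have hle : gapF n weak i ≤ gapF n weak (bestJ n weak) :=
      bestIdx_max (gapF n weak) (weak.length - 1) i (by omega)
    rw [Prod.Lex.le_iff]
    by_cases heq : gapF n weak i = gapF n weak (bestJ n weak)
    · have hJi : bestJ n weak ≤ i := by
        by_contra hlt
        have := bestIdx_strict (gapF n weak) (weak.length - 1) i (by unfold bestJ at *; omega)
        unfold bestJ at *; omega
      refine Or.inr ⟨?_, ?_⟩
      · simp [heq]
      · simpa using (show ((bestJ n weak : Int)) ≤ (i : Int) from by exact_mod_cast hJi)
    · exact Or.inl (by simpa using (by omega : n - gapF n weak (bestJ n weak) < n - gapF n weak i))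
  have h1 : (toLex m : Lex (Int × Int)) ≤ toLex (n - gapF n weak (bestJ n weak), (bestJ n weak : Int)) := hmle _ hmem_t
  have h2 := htmin m hm_mem
  exact toLex.injective (le_antisymm h1 h2)

theorem B_eq (n : Int) (weak : List Int) (hne : weak ≠ []) :
    search_start_alt n weak
      = (n - gapF n weak (bestJ n weak), normAt n (rotAt weak (bestJ n weak))) := by
  unfold search_start_alt
  dsimp only
  rw [spans_eq n weak hne, sorted_head_eq n weak hne]
  rw [PySem.List.slice_from_natCast, PySem.List.slice_to_natCast]
  simp only [PySem.List.pyGet?_zero]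
  rfl

-- ===== VERDICT (by name: the statement is the Claim_ definition above) =====
theorem search_start_spec : Claim_equal_search_start := by
  intro n weak _ hpre
  unfold Spec_search_start
  rw [A_eq n weak, B_eq n weak hpre]
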